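-- pv_equiv track=rewrite | github.com/mattdinhnguyen/algos | revTotalByDays.py | getMilestoneDays
-- ===== SOURCE A (Python) =====
-- def getMilestoneDays(revenues, milestones):
--   milestoneDays = []
--   revTotal = 0
--   cumRevByDays = []
--
--   for rev in revenues:
--     revTotal += rev
--     cumRevByDays.append(revTotal)
--
--   for m in milestones:
--     for day,rev in enumerate(cumRevByDays):
--       if rev >= m:
--         milestoneDays.append(day+1)
--         break
--
--   return milestoneDays
-- ===== SOURCE B (Python) =====
-- def getMilestoneDays(revenues, milestones):
--     # Running maximum of the prefix sums: peaks is non-decreasing, and the first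
--     # day the cumulative revenue reaches m equals the first day peaks reaches m,
--     # so a binary search (bisect_left) answers each milestone in O(log N).
--     peaks = []
--     total = 0
--     best = None
--     for rev in revenues:
--         total += rev
--         best = total if best is None or total > best else best
--         peaks.append(best)
--     n = len(peaks)
--     res = []
--     for m in milestones:
--         lo, hi = 0, n
--         while lo < hi:
--             mid = (lo + hi) // 2
--             if peaks[mid] < m:
--                 lo = mid + 1
--             else:
--                 hi = mid
--         if lo < n:
--             res.append(lo + 1)
--     return res
-- ===== Notes on version B (the rewrite author's own statement) =====
-- stated objective: faster
-- what changed: Replaces the linear scan of the prefix-sum array per milestone with a hand-written bisect_left binary search over the running maximum of the prefix sums (non-decreasing even when revenues are negative).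
import Mathlib
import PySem

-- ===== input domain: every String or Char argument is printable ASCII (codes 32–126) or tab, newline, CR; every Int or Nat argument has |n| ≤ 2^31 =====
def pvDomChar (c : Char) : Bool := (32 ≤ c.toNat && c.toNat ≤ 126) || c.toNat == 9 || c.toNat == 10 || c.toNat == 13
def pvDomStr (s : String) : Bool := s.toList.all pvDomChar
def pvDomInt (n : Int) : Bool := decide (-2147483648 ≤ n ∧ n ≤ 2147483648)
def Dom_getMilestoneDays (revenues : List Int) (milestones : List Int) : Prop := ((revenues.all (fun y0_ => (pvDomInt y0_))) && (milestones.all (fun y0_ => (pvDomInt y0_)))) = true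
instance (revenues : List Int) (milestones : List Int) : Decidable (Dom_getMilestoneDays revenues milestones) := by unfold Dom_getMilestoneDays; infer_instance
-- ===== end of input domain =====

-- B replaces A's per-milestone linear scan of the prefix sums with a binary search
-- over the running maximum of the prefix sums (objective: faster, O(N + M log N) vs O(M*N)).

-- ===== PORT A =====
-- inner 'for day,rev in enumerate(cumRevByDays): if rev >= m: ...; break' loop
def firstGE : List Int → Int → Nat → Option Nat
  | [], _, _ => none
  | r :: rest, m, day => if m ≤ r then some day else firstGE rest m (day + 1)

def getMilestoneDays (revenues : List Int) (milestones : List Int) : List Int :=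
  let st := revenues.foldl (fun (st : Int × List Int) rev =>
    (st.1 + rev, st.2 ++ [st.1 + rev])) (0, [])
  let cumRevByDays := st.2
  milestones.foldl (fun milestoneDays m =>
    match firstGE cumRevByDays m 0 with
    | some day => milestoneDays ++ [(day : Int) + 1]
    | none => milestoneDays) []

-- ===== PORT B =====
-- hand-written bisect_left loop of Source B; the index mid is always < peaks.length here,
-- so getD is exact for the in-range Python access peaks[mid]
def bisect (peaks : List Int) (m : Int) (lo hi : Nat) : Nat :=
  if _h : lo < hi then
    let mid := (lo + hi) / 2
    if peaks.getD mid 0 < m then bisect peaks m (mid + 1) hi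
    else bisect peaks m lo mid
  else lo
termination_by hi - lo
decreasing_by all_goals omega

def getMilestoneDays_alt (revenues : List Int) (milestones : List Int) : List Int :=
  let st := revenues.foldl (fun (st : Int × Option Int × List Int) rev =>
    let total := st.1 + rev
    let best := match st.2.1 with
      | none => total
      | some b => if b < total then total else b
    (total, some best, st.2.2 ++ [best])) (0, none, [])
  let peaks := st.2.2
  let n := peaks.length
  milestones.foldl (fun res m =>
    let lo := bisect peaks m 0 n
    if lo < n then res ++ [(lo : Int) + 1] else res) []

-- ===== PRECONDITION & SPEC =====
def Spec_getMilestoneDays (revenues : List Int) (milestones : List Int) (out : List Int) : Prop := out = getMilestoneDays_alt revenues milestones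
instance (revenues : List Int) (milestones : List Int) (out : List Int) : Decidable (Spec_getMilestoneDays revenues milestones out) := by unfold Spec_getMilestoneDays; infer_instance

-- ===== CLAIM (what is proved, stated in full; the proofs are below) =====
def Claim_equal_getMilestoneDays : Prop := ∀ (revenues : List Int) (milestones : List Int), Dom_getMilestoneDays revenues milestones → Spec_getMilestoneDays revenues milestones (getMilestoneDays revenues milestones)

-- ===== LEMMAS AND PROOFS =====

-- spec-level prefix sums
def scanPre : Int → List Int → List Int
  | _, [] => []
  | t, r :: rs => (t + r) :: scanPre (t + r) rs

-- spec-level running maximum (the Option mirrors Source B's 'best is None' start)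
def rmaxO : Option Int → List Int → List Int
  | _, [] => []
  | none, c :: cs => c :: rmaxO (some c) cs
  | some b, c :: cs => (if b < c then c else b) :: rmaxO (some (if b < c then c else b)) cs

theorem foldA (rs : List Int) : ∀ (t : Int) (acc : List Int),
    (rs.foldl (fun (st : Int × List Int) rev => (st.1 + rev, st.2 ++ [st.1 + rev])) (t, acc)).2
      = acc ++ scanPre t rs := by
  induction rs with
  | nil => intro t acc; simp [scanPre]
  | cons r rs ih =>
    intro t acc
    simp only [List.foldl_cons, scanPre]
    rw [ih]
    simp

theorem foldB (rs : List Int) : ∀ (t : Int) (b : Option Int) (acc : List Int),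
    (rs.foldl (fun (st : Int × Option Int × List Int) rev =>
      let total := st.1 + rev
      let best := match st.2.1 with
        | none => total
        | some bb => if bb < total then total else bb
      (total, some best, st.2.2 ++ [best])) (t, b, acc)).2.2
      = acc ++ rmaxO b (scanPre t rs) := by
  induction rs with
  | nil => intro t b acc; simp [scanPre, rmaxO]
  | cons r rs ih =>
    intro t b acc
    cases b with
    | none =>
      simp only [List.foldl_cons, scanPre, rmaxO]
      rw [ih]
      simp
    | some bb =>
      simp only [List.foldl_cons, scanPre, rmaxO]
      rw [ih]
      simp

-- A's first-hit scan is invariant under replacing cum by its running maximum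
theorem firstGE_rmaxO : ∀ (L : List Int) (b : Option Int) (m : Int) (d : Nat),
    (∀ x, b = some x → x < m) → firstGE (rmaxO b L) m d = firstGE L m d := by
  intro L
  induction L with
  | nil => intro b m d _; cases b <;> simp [rmaxO]
  | cons c cs ih =>
    intro b m d hb
    cases b with
    | none =>
      simp only [rmaxO, firstGE]
      by_cases h : m ≤ c
      · simp [h]
      · simp only [if_neg h]
        exact ih (some c) m (d + 1) (by intro x hx; cases hx; omega)
    | some bb =>
      have hbb : bb < m := hb bb rfl
      simp only [rmaxO, firstGE]
      by_cases hc : bb < c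
      · simp only [if_pos hc]
        by_cases h : m ≤ c
        · simp [h]
        · simp only [if_neg h]
          exact ih (some c) m (d + 1) (by intro x hx; cases hx; omega)
      · simp only [if_neg hc]
        have h1 : ¬ m ≤ bb := by omega
        have h2 : ¬ m ≤ c := by omega
        simp only [if_neg h1, if_neg h2]
        exact ih (some bb) m (d + 1) (by intro x hx; cases hx; omega)

-- the running maximum is non-decreasing (and bounded below by its seed)
theorem rmaxO_mono_aux : ∀ (L : List Int) (bb : Int),
    (rmaxO (some bb) L).Pairwise (· ≤ ·) ∧ ∀ x ∈ rmaxO (some bb) L, bb ≤ x := by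
  intro L
  induction L with
  | nil => intro bb; simp [rmaxO]
  | cons c cs ih =>
    intro bb
    simp only [rmaxO]
    constructor
    · refine List.pairwise_cons.mpr ⟨?_, (ih _).1⟩
      intro x hx
      exact (ih _).2 x hx
    · intro x hx
      rcases List.mem_cons.mp hx with h | h
      · subst h; split <;> omega
      · have := (ih (if bb < c then c else bb)).2 x h
        split at this <;> omega

theorem rmaxO_pairwise : ∀ (L : List Int), (rmaxO none L).Pairwise (· ≤ ·) := by
  intro L
  cases L with
  | nil => simp [rmaxO]
  | cons c cs =>
    simp only [rmaxO]
    refine List.pairwise_cons.mpr ⟨?_, (rmaxO_mono_aux cs c).1⟩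
    intro x hx
    exact (rmaxO_mono_aux cs c).2 x hx

theorem getD_mono (L : List Int) (hL : L.Pairwise (· ≤ ·)) :
    ∀ i j, i ≤ j → j < L.length → L.getD i 0 ≤ L.getD j 0 := by
  intro i j hij hj
  rcases Nat.eq_or_lt_of_le hij with h | h
  · subst h; exact le_refl _
  · have hi : i < L.length := Nat.lt_trans h hj
    rw [List.getD_eq_getElem L 0 hi, List.getD_eq_getElem L 0 hj]
    exact (List.pairwise_iff_getElem.mp hL) i j hi hj h

theorem bisect_spec (L : List Int) (m : Int)
    (mono : ∀ i j, i ≤ j → j < L.length → L.getD i 0 ≤ L.getD j 0) :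
    ∀ (fuel lo hi : Nat), hi - lo ≤ fuel → lo ≤ hi → hi ≤ L.length →
    (∀ i, i < lo → L.getD i 0 < m) → (∀ i, hi ≤ i → i < L.length → m ≤ L.getD i 0) →
    bisect L m lo hi ≤ L.length ∧
    (∀ i, i < bisect L m lo hi → L.getD i 0 < m) ∧
    (bisect L m lo hi < L.length → m ≤ L.getD (bisect L m lo hi) 0) := by
  intro fuel
  induction fuel with
  | zero =>
    intro lo hi hf hlh hhl hlow hhigh
    have : lo = hi := by omega
    subst this
    rw [bisect]
    simp only [lt_irrefl, dite_false]
    exact ⟨by omega, hlow, fun h => hhigh lo (le_refl _) h⟩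
  | succ fuel ih =>
    intro lo hi hf hlh hhl hlow hhigh
    rw [bisect]
    by_cases h : lo < hi
    · simp only [dif_pos h]
      by_cases hm : L.getD ((lo + hi) / 2) 0 < m
      · simp only [if_pos hm]
        refine ih ((lo + hi) / 2 + 1) hi (by omega) (by omega) hhl ?_ hhigh
        intro i hi'
        by_cases hile : i < lo
        · exact hlow i hile
        · calc L.getD i 0 ≤ L.getD ((lo + hi) / 2) 0 := mono i _ (by omega) (by omega)
            _ < m := hm
      · simp only [if_neg hm]
        refine ih lo ((lo + hi) / 2) (by omega) (by omega) (by omega) hlow ?_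
        intro i hi1 hi2
        calc m ≤ L.getD ((lo + hi) / 2) 0 := by omega
          _ ≤ L.getD i 0 := mono _ i hi1 hi2
    · simp only [dif_neg h]
      have : lo = hi := by omega
      subst this
      exact ⟨by omega, hlow, fun hh => hhigh lo (le_refl _) hh⟩

-- characterisation of firstGE from the boundary index k
theorem firstGE_of : ∀ (L : List Int) (m : Int) (k d : Nat), k ≤ L.length →
    (∀ i, i < k → L.getD i 0 < m) → (k < L.length → m ≤ L.getD k 0) →
    firstGE L m d = if k < L.length then some (k + d) else none := by
  intro L
  induction L with
  | nil =>
    intro m k d hk _ _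
    simp [firstGE]
  | cons c cs ih =>
    intro m k d hk hlow hhigh
    simp only [firstGE]
    by_cases hmc : m ≤ c
    · have hk0 : k = 0 := by
        by_contra hne
        have := hlow 0 (by omega)
        simp [List.getD] at this
        omega
      subst hk0
      simp only [if_pos hmc]
      simp
    · have hkne : k ≠ 0 := by
        intro h0
        subst h0
        have := hhigh (by simp)
        simp [List.getD] at this
        omega
      obtain ⟨k', rfl⟩ : ∃ k', k = k' + 1 := ⟨k - 1, by omega⟩
      simp only [if_neg hmc]
      rw [ih m k' (d + 1) (by simpa using hk)
        (fun i hi => by simpa using hlow (i + 1) (by omega))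
        (fun hlt => by simpa using hhigh (by simpa using hlt))]
      have : k' + 1 < (c :: cs).length ↔ k' < cs.length := by simp
      by_cases hx : k' < cs.length
      · simp only [if_pos hx, if_pos (this.mpr hx)]
        congr 1
        omega
      · simp [hx]

-- per-milestone agreement: each step of the two output folds appends the same thing
theorem step_eq (revenues : List Int) (m : Int) :
    (let cum := scanPre 0 revenues
     let peaks := rmaxO none cum
     let n := peaks.length
     let lo := bisect peaks m 0 n
     (match firstGE cum m 0 with
       | some day => some ((day : Int) + 1)
       | none => (none : Option Int))
      = if lo < n then some ((lo : Int) + 1) else none) := by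
  intro cum peaks n lo
  have hmono := getD_mono peaks (rmaxO_pairwise cum)
  have hspec := bisect_spec peaks m hmono n 0 n (by omega) (by omega) (le_refl _)
    (by intro i hi; omega) (by intro i h1 h2; omega)
  have hfg : firstGE peaks m 0 = if lo < peaks.length then some lo else none := by
    have := firstGE_of peaks m lo 0 hspec.1 hspec.2.1 hspec.2.2
    simpa using this
  have hcum : firstGE cum m 0 = firstGE peaks m 0 :=
    (firstGE_rmaxO cum none m 0 (by intro x hx; cases hx)).symm
  rw [hcum, hfg]
  by_cases h : lo < peaks.length
  · simp [h, n]
  · simp [h, n]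

-- ===== VERDICT (by name: the statement is the Claim_ definition above) =====
theorem getMilestoneDays_spec : Claim_equal_getMilestoneDays := by
  intro revenues milestones hdom
  clear hdom
  unfold Spec_getMilestoneDays getMilestoneDays getMilestoneDays_alt
  dsimp only
  rw [foldA revenues 0 [], foldB revenues 0 none []]
  simp only [List.nil_append]
  set cum := scanPre 0 revenues with hcum
  set peaks := rmaxO none cum with hpeaks
  induction milestones using List.reverseRecOn with
  | nil => simp
  | append_singleton ms m ih =>
    simp only [List.foldl_append, List.foldl_cons, List.foldl_nil]
    rw [ih]
    have hstep := step_eq revenues m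
    simp only [← hcum, ← hpeaks] at hstep
    rcases hfg : firstGE cum m 0 with _ | day <;> rw [hfg] at hstep <;>
      by_cases hif : bisect peaks m 0 peaks.length < peaks.length <;>
        simp [hif] at hstep ⊢ <;> simp_all
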